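-- pv_equiv track=rewrite | github.com/ldunekac/LMDAOC2022 | day18/day18.py | get_total_edges
-- ===== SOURCE A (Python) =====
-- adj_indexes = [
--     (1, 0, 0),
--     (-1, 0, 0),
--     (0, 1, 0),
--     (0, -1, 0),
--     (0, 0, 1),
--     (0, 0, -1),
-- ]
--
-- def get_total_edges(cubes):
--     nodes = set(cubes)
--
--     total_edges = 0
--     for (x, y, z) in nodes:
--         adj_nodes = [(x + x1, y + y1, z + z1) for x1, y1, z1 in adj_indexes]
--         for adj_node in adj_nodes:
--             if adj_node in nodes:
--                 total_edges += 1
--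
--     assert total_edges % 2 == 0
--     return total_edges
-- ===== SOURCE B (Python) =====
-- def get_total_edges(cubes):
--     nodes = list(set(cubes))
--     pairs = 0
--     for i, (x, y, z) in enumerate(nodes):
--         for (x2, y2, z2) in nodes[i + 1:]:
--             if abs(x - x2) + abs(y - y2) + abs(z - z2) == 1:
--                 pairs += 1
--     return 2 * pairs
-- ===== Notes on version B (the rewrite author's own statement) =====
-- stated objective: alternative
-- what changed: Instead of generating the six neighbour coordinates of every cube and testing set membership (counting each adjacency twice), B scans each unordered pair of distinct cubes once, tests Manhattan distance 1, and returns twice the pair count.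
import Mathlib
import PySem

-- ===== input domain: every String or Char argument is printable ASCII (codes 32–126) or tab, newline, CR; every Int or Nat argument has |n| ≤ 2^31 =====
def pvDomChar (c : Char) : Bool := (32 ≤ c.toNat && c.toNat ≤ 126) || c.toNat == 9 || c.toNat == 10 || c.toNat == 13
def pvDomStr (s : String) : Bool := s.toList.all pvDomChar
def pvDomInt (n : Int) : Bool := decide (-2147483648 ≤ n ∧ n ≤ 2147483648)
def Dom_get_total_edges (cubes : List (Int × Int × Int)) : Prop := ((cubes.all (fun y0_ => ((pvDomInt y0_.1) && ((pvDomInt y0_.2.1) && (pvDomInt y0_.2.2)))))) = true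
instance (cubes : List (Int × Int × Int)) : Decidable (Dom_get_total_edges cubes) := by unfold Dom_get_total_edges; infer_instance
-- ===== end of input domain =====

-- B replaces A's six-neighbour generation + set-membership count (each adjacency seen twice)
-- by a single scan over unordered pairs of distinct cubes testing Manhattan distance 1, doubled;
-- objective: alternative (same result by a different algorithm, not claimed faster).

-- ===== PORT A =====
def adj_indexes : List (Int × Int × Int) :=
  [(1, 0, 0), (-1, 0, 0), (0, 1, 0), (0, -1, 0), (0, 0, 1), (0, 0, -1)]

def get_total_edges (cubes : List (Int × Int × Int)) : Int :=
  let nodes : PySem.Set (Int × Int × Int) := PySem.Set.ofList cubes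
  let total_edges : Int :=
    nodes.foldl (fun total_edges node =>
      let adj_nodes := adj_indexes.map (fun d =>
        (node.1 + d.1, node.2.1 + d.2.1, node.2.2 + d.2.2))
      adj_nodes.foldl (fun te adj_node =>
        if PySem.Set.contains nodes adj_node then te + 1 else te) total_edges) 0
  total_edges

-- ===== PORT B =====
-- abs(x - x2) + abs(y - y2) + abs(z - z2) == 1
def pvAdjB (p q : Int × Int × Int) : Bool :=
  (p.1 - q.1).natAbs + (p.2.1 - q.2.1).natAbs + (p.2.2 - q.2.2).natAbs == 1

-- the enumerate loop: at index i the inner loop runs over nodes[i+1:], i.e. the tail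
def pvPairsLoop : Int → List (Int × Int × Int) → Int
  | pairs, [] => pairs
  | pairs, p :: rest =>
      pvPairsLoop (rest.foldl (fun a q => if pvAdjB p q then a + 1 else a) pairs) rest

def get_total_edges_alt (cubes : List (Int × Int × Int)) : Int :=
  let nodes : PySem.Set (Int × Int × Int) := PySem.Set.ofList cubes
  2 * pvPairsLoop 0 nodes

-- ===== PRECONDITION & SPEC =====
def Spec_get_total_edges (cubes : List (Int × Int × Int)) (out : Int) : Prop := out = get_total_edges_alt cubes
instance (cubes : List (Int × Int × Int)) (out : Int) : Decidable (Spec_get_total_edges cubes out) := by unfold Spec_get_total_edges; infer_instance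

-- ===== CLAIM (what is proved, stated in full; the proofs are below) =====
def Claim_equal_get_total_edges : Prop := ∀ (cubes : List (Int × Int × Int)), Dom_get_total_edges cubes → Spec_get_total_edges cubes (get_total_edges cubes)

-- ===== LEMMAS AND PROOFS =====

-- counting loop shape (Int accumulator)
lemma pvFoldl_if_count {α : Type} (p : α → Bool) :
    ∀ (L : List α) (acc : Int),
      L.foldl (fun a q => if p q then a + 1 else a) acc = acc + (L.countP p : Int) := by
  intro L
  induction L with
  | nil => intro acc; simp
  | cons x t ih =>
      intro acc
      by_cases h : p x = true <;> simp [h, ih] <;> ring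

-- B's accumulator-threaded loop, as a sum over tails
def pvTailSum : List (Int × Int × Int) → Int
  | [] => 0
  | p :: rest => (rest.countP (pvAdjB p) : Int) + pvTailSum rest

lemma pvPairsLoop_eq :
    ∀ (S : List (Int × Int × Int)) (acc : Int), pvPairsLoop acc S = acc + pvTailSum S := by
  intro S
  induction S with
  | nil => intro acc; simp [pvPairsLoop, pvTailSum]
  | cons p rest ih =>
      intro acc
      simp [pvPairsLoop, pvTailSum, pvFoldl_if_count, ih]
      ring

lemma pvAdjB_irrefl (p : Int × Int × Int) : pvAdjB p p = false := by
  simp [pvAdjB]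

lemma pvAdjB_symm (p q : Int × Int × Int) : pvAdjB p q = pvAdjB q p := by
  obtain ⟨x, y, z⟩ := p; obtain ⟨a, b, c⟩ := q
  simp only [pvAdjB]
  have : (x - a).natAbs + (y - b).natAbs + (z - c).natAbs
       = (a - x).natAbs + (b - y).natAbs + (c - z).natAbs := by omega
  rw [this]

lemma pvSum_map_ite (t : List (Int × Int × Int)) (f : (Int × Int × Int) → Bool) :
    (t.map (fun p => (if f p then (1 : Int) else 0))).sum = (t.countP f : Int) := by
  induction t with
  | nil => simp
  | cons a t ih => by_cases h : f a = true <;> simp [h, ih] <;> ring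

lemma pvSum_map_add (t : List (Int × Int × Int)) (f g : (Int × Int × Int) → Int) :
    (t.map (fun p => f p + g p)).sum = (t.map f).sum + (t.map g).sum := by
  induction t with
  | nil => simp
  | cons a t ih => simp [ih]; ring

-- double counting: the full symmetric count is twice the over-tails count
lemma pvDoubleCount :
    ∀ (S : List (Int × Int × Int)),
      (S.map (fun p => (S.countP (pvAdjB p) : Int))).sum = 2 * pvTailSum S := by
  intro S
  induction S with
  | nil => simp [pvTailSum]
  | cons a t ih =>
      have hmap : t.map (fun p => (((a :: t).countP (pvAdjB p) : Nat) : Int))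
          = t.map (fun p => (if pvAdjB p a then (1 : Int) else 0) + (t.countP (pvAdjB p) : Int)) := by
        apply List.map_congr_left
        intro p _
        simp [List.countP_cons]
        by_cases h : pvAdjB p a = true <;> simp [h] <;> ring
      have hsymm : t.countP (fun p => pvAdjB p a) = t.countP (pvAdjB a) := by
        apply List.countP_congr
        intro p _
        rw [pvAdjB_symm]
      calc ((a :: t).map (fun p => ((a :: t).countP (pvAdjB p) : Int))).sum
          = ((a :: t).countP (pvAdjB a) : Int)
            + (t.map (fun p => (((a :: t).countP (pvAdjB p) : Nat) : Int))).sum := by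
            simp
        _ = (t.countP (pvAdjB a) : Int)
            + ((t.countP (fun p => pvAdjB p a) : Int) + (t.map (fun p => (t.countP (pvAdjB p) : Int))).sum) := by
            rw [hmap, pvSum_map_add, pvSum_map_ite, List.countP_cons]
            simp [pvAdjB_irrefl]
        _ = 2 * pvTailSum (a :: t) := by
            rw [hsymm, ih]
            simp [pvTailSum]
            ring

-- outer loop of A as a sum of per-node neighbour counts
lemma pvAFold (S : PySem.Set (Int × Int × Int)) :
    ∀ (L : List (Int × Int × Int)) (acc : Int),
      L.foldl (fun total_edges node =>
        (adj_indexes.map (fun d => (node.1 + d.1, node.2.1 + d.2.1, node.2.2 + d.2.2))).foldl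
          (fun te adj_node => if PySem.Set.contains S adj_node then te + 1 else te) total_edges) acc
      = acc + (L.map (fun node =>
          (((adj_indexes.map (fun d => (node.1 + d.1, node.2.1 + d.2.1, node.2.2 + d.2.2))).countP
            (fun q => PySem.Set.contains S q) : Nat) : Int))).sum := by
  intro L
  induction L with
  | nil => intro acc; simp
  | cons x t ih =>
      intro acc
      rw [List.foldl_cons, ih, pvFoldl_if_count]
      simp only [List.map_cons, List.sum_cons]
      ring

-- swapping the roles of the two nodup lists in a membership count
lemma pvCountP_mem_comm (L M : List (Int × Int × Int))
    (hL : L.Nodup) (hM : M.Nodup) :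
    L.countP (fun x => decide (x ∈ M)) = M.countP (fun x => decide (x ∈ L)) := by
  have key : ∀ (P Q : List (Int × Int × Int)), P.Nodup →
      P.countP (fun x => decide (x ∈ Q)) = (P.toFinset ∩ Q.toFinset).card := by
    intro P Q hP
    rw [List.countP_eq_length_filter]
    have hnd : (P.filter (fun x => decide (x ∈ Q))).Nodup := hP.filter _
    rw [← List.toFinset_card_of_nodup hnd]
    congr 1
    ext a
    simp [Finset.mem_inter]
  rw [key L M hL, key M L hM, Finset.inter_comm]

-- the six generated neighbours of p are exactly the points at Manhattan distance 1
lemma pvNeighbours_mem (p q : Int × Int × Int) :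
    q ∈ adj_indexes.map (fun d => (p.1 + d.1, p.2.1 + d.2.1, p.2.2 + d.2.2))
      ↔ pvAdjB p q = true := by
  obtain ⟨x, y, z⟩ := p; obtain ⟨a, b, c⟩ := q
  simp [adj_indexes, pvAdjB, Prod.ext_iff]
  omega

lemma pvNeighbours_nodup (p : Int × Int × Int) :
    (adj_indexes.map (fun d => (p.1 + d.1, p.2.1 + d.2.1, p.2.2 + d.2.2))).Nodup := by
  obtain ⟨x, y, z⟩ := p
  simp [adj_indexes, List.nodup_cons, Prod.ext_iff]

-- per-node: A's six-membership count equals B's adjacency count over the whole set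
lemma pvPerNode (S : List (Int × Int × Int)) (hS : S.Nodup) (p : Int × Int × Int) :
    (adj_indexes.map (fun d => (p.1 + d.1, p.2.1 + d.2.1, p.2.2 + d.2.2))).countP
      (fun q => PySem.Set.contains S q)
    = S.countP (pvAdjB p) := by
  have h1 : (adj_indexes.map (fun d => (p.1 + d.1, p.2.1 + d.2.1, p.2.2 + d.2.2))).countP
      (fun q => PySem.Set.contains S q)
      = (adj_indexes.map (fun d => (p.1 + d.1, p.2.1 + d.2.1, p.2.2 + d.2.2))).countP
      (fun x => decide (x ∈ S)) := by
    apply List.countP_congr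
    intro q _
    simp [PySem.Set.contains]
  have h3 : S.countP (fun x => decide (x ∈ adj_indexes.map
      (fun d => (p.1 + d.1, p.2.1 + d.2.1, p.2.2 + d.2.2)))) = S.countP (pvAdjB p) := by
    apply List.countP_congr
    intro q _
    simp only [decide_eq_true_eq]
    exact pvNeighbours_mem p q
  exact h1.trans ((pvCountP_mem_comm _ _ (pvNeighbours_nodup p) hS).trans h3)

-- ===== VERDICT (by name: the statement is the Claim_ definition above) =====
theorem get_total_edges_spec : Claim_equal_get_total_edges := by
  intro cubes _
  unfold Spec_get_total_edges get_total_edges get_total_edges_alt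
  simp only [pvAFold, pvPairsLoop_eq, zero_add]
  have hnd : (PySem.Set.ofList cubes : List (Int × Int × Int)).Nodup := PySem.Set.nodup_ofList cubes
  have hmap : ((PySem.Set.ofList cubes : List (Int × Int × Int)).map (fun node =>
      (((adj_indexes.map (fun d => (node.1 + d.1, node.2.1 + d.2.1, node.2.2 + d.2.2))).countP
        (fun q => PySem.Set.contains (PySem.Set.ofList cubes) q) : Nat) : Int)))
      = ((PySem.Set.ofList cubes : List (Int × Int × Int)).map (fun p =>
          (((PySem.Set.ofList cubes : List (Int × Int × Int)).countP (pvAdjB p) : Nat) : Int))) := by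
    apply List.map_congr_left
    intro p _
    rw [pvPerNode _ hnd p]
  rw [hmap, pvDoubleCount]
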